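-- pv_equiv track=rewrite | github.com/mrdavidal/py.checkio.org | goes_right_after.py | goes_after
-- ===== SOURCE A (Python) =====
-- def goes_after(word: str, first: str, second: str) -> bool:
--     # your code here
--     check = 0
--     if first == second:
--         return False
--     for i in range(len(word)):
--         try:
--             if word[i] == first or word[i] == second:
--                 check += 1
--             if word[i] == first and word[i + 1] == second and check == 1:
--                 return True
--         except:
--             return False
--     return False
-- ===== SOURCE B (Python) =====
-- def goes_after(word: str, first: str, second: str) -> bool:
--     # Locate earliest occurrences instead of scanning with a counter.
--     if first == second or len(first) != 1 or len(second) != 1: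
--         return False
--     p1 = word.find(first)
--     if p1 == -1:
--         return False
--     p2 = word.find(second)
--     if p2 != -1 and p2 < p1:
--         return False
--     return p1 + 1 < len(word) and word[p1 + 1] == second
-- ===== Notes on version B (the rewrite author's own statement) =====
-- stated objective: simpler
-- what changed: Replaces A's index loop with a running counter, try/except and mid-loop return by a straight-line decomposition: locate the earliest occurrences of first and second with str.find, reject if second's comes earlier, then test the single adjacent position.
import Mathlib
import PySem

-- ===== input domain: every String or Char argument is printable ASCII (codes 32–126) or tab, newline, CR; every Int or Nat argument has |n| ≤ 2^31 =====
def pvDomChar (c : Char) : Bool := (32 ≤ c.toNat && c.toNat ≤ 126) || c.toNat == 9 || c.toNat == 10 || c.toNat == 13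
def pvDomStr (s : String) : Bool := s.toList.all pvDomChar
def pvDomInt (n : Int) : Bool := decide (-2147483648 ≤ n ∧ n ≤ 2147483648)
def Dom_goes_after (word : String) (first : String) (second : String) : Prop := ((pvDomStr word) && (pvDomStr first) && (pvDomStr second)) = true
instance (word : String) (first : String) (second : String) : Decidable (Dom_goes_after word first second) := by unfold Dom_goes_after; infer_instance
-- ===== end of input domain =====

-- B replaces A's counter-carrying scan-with-mid-loop-return by locating the earliest
-- occurrences with str.find and comparing positions; objective: simpler.

-- ===== PORT A =====
-- the for-i-in-range loop; word[i] is always in range, word[i+1] may raise IndexError,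
-- which the bare `except` turns into `return False`
def goesAfterLoopA (cs : List Char) (first second : String) (i : Nat) (check : Int) : Bool :=
  if i < cs.length then
    match cs[i]? with
    | none => false   -- unreachable: i < length
    | some c =>
      let check' := if String.ofList [c] == first || String.ofList [c] == second then check + 1 else check
      if String.ofList [c] == first then
        match cs[i+1]? with
        | none => false     -- IndexError caught by the bare except: return False
        | some d =>
          if String.ofList [d] == second && check' == 1 then true
          else goesAfterLoopA cs first second (i+1) check'
      else goesAfterLoopA cs first second (i+1) check'
  else false
termination_by cs.length - i

def goes_after (word : String) (first : String) (second : String) : Bool :=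
  if first == second then false
  else goesAfterLoopA word.toList first second 0 0

-- ===== PORT B =====
def goes_after_alt (word : String) (first : String) (second : String) : Bool :=
  if first == second || !(PySem.Str.len first == 1) || !(PySem.Str.len second == 1) then false
  else
    let p1 := PySem.Str.find word first
    if p1 == -1 then false
    else
      let p2 := PySem.Str.find word second
      if !(p2 == -1) && p2 < p1 then false
      else
        decide (p1 + 1 < PySem.Str.len word) &&
          (match PySem.Str.pyGet? word (p1 + 1) with
           | some d => String.ofList [d] == second
           | none => false)

-- ===== PRECONDITION & SPEC =====
def Spec_goes_after (word : String) (first : String) (second : String) (out : Bool) : Prop := out = goes_after_alt word first second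
instance (word : String) (first : String) (second : String) (out : Bool) : Decidable (Spec_goes_after word first second out) := by unfold Spec_goes_after; infer_instance

-- ===== CLAIM (what is proved, stated in full; the proofs are below) =====
def Claim_equal_goes_after : Prop := ∀ (word : String) (first : String) (second : String), Dom_goes_after word first second → Spec_goes_after word first second (goes_after word first second)

-- ===== LEMMAS AND PROOFS =====

-- common semantic core: what happens at the first occurrence of a or b
def scanAB (a b : Char) : List Char → Bool
  | [] => false
  | c :: rest => if c == a then rest.head? == some b
                 else if c == b then false
                 else scanAB a b rest

theorem mk_beq_iff (c : Char) (s : String) : (String.ofList [c] == s) = true ↔ s.toList = [c] := by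
  constructor
  · intro h; have := eq_of_beq h; subst this; simp
  · intro h
    have : s = String.ofList [c] := by
      have := congrArg String.ofList h; simpa using this
    simp [this]

theorem mk_beq_false (c : Char) (s : String) (h : s.toList ≠ [c]) : (String.ofList [c] == s) = false := by
  rw [← Bool.not_eq_true, ← ne_eq]
  intro hc; exact h ((mk_beq_iff c s).1 hc)

theorem ofList_beq_single (c a : Char) : (String.ofList [c] == String.ofList [a]) = (c == a) := by
  by_cases h : c = a
  · subst h; simp
  · rw [mk_beq_false c _ (by simpa using (Ne.symm h))]
    simp [h]

-- A's loop returns false once check ≥ 1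
theorem loopA_false_of_pos (cs : List Char) (f s : String) (i : Nat) (check : Int)
    (h : 1 ≤ check) : goesAfterLoopA cs f s i check = false := by
  rw [goesAfterLoopA]
  split
  case isFalse => rfl
  split
  case h_1 => rfl
  case h_2 c hc =>
    split
    case isFalse hor =>
      simp only [Bool.or_eq_true, not_or] at hor
      dsimp only
      rw [if_neg hor.1]
      exact loopA_false_of_pos cs f s (i+1) check h
    case isTrue hor =>
      dsimp only
      by_cases hf : (String.ofList [c] == f) = true
      · rw [if_pos hf]
        cases hd : cs[i+1]? with
        | none => rfl
        | some d =>
          dsimp only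
          rw [if_neg (by simp; omega)]
          exact loopA_false_of_pos cs f s (i+1) (check+1) (by omega)
      · rw [if_neg hf]
        exact loopA_false_of_pos cs f s (i+1) (check+1) (by omega)
termination_by cs.length - i
decreasing_by all_goals omega

-- A's loop returns false when no single char equals `first`
theorem loopA_false_no_first (cs : List Char) (f s : String) (i : Nat) (check : Int)
    (h : ∀ c : Char, f.toList ≠ [c]) : goesAfterLoopA cs f s i check = false := by
  rw [goesAfterLoopA]
  split
  case isFalse => rfl
  split
  case h_1 => rfl
  case h_2 c hc =>
    have hf := mk_beq_false c f (h c)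
    split <;> dsimp only <;> rw [if_neg (by simp [hf])] <;>
      exact loopA_false_no_first cs f s (i+1) _ h
termination_by cs.length - i
decreasing_by all_goals omega

-- A's loop returns false when no single char equals `second`
theorem loopA_false_no_second (cs : List Char) (f s : String) (i : Nat) (check : Int)
    (h : ∀ c : Char, s.toList ≠ [c]) : goesAfterLoopA cs f s i check = false := by
  rw [goesAfterLoopA]
  split
  case isFalse => rfl
  split
  case h_1 => rfl
  case h_2 c hc =>
    split <;> dsimp only <;>
    · by_cases hf : (String.ofList [c] == f) = true
      · rw [if_pos hf]
        cases hd : cs[i+1]? with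
        | none => rfl
        | some d =>
          dsimp only
          rw [if_neg (by simp [mk_beq_false d s (h d)])]
          exact loopA_false_no_second cs f s (i+1) _ h
      · rw [if_neg hf]
        exact loopA_false_no_second cs f s (i+1) _ h
termination_by cs.length - i
decreasing_by all_goals omega

-- A-side characterisation
theorem loopA_eq_scan (cs : List Char) (a b : Char) (hab : a ≠ b) (i : Nat) :
    goesAfterLoopA cs (String.ofList [a]) (String.ofList [b]) i 0 = scanAB a b (cs.drop i) := by
  rw [goesAfterLoopA]
  by_cases hi : i < cs.length
  · rw [if_pos hi, List.getElem?_eq_getElem hi]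
    dsimp only
    rw [List.drop_eq_getElem_cons hi, scanAB]
    simp only [ofList_beq_single]
    by_cases hca : cs[i] = a
    · rw [if_pos (by simp [hca]), if_pos (by simp [hca])]
      cases hd : cs[i+1]? with
      | none =>
        have hh : (cs.drop (i+1)).head? = none := by rw [List.head?_drop]; exact hd
        simp [hh, hca]
      | some d =>
        dsimp only
        have hh : (cs.drop (i+1)).head? = some d := by rw [List.head?_drop]; exact hd
        by_cases hdb : d = b
        · rw [if_pos (by simp [hdb])]
          simp [hh, hdb, hca]
        · rw [if_neg (by simp [hdb]), loopA_false_of_pos cs _ _ (i+1) (0+1) (by omega)]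
          simp [hh, hdb, hca]
    · have h1 : (cs[i] == a) = false := by simp [hca]
      by_cases hcb : cs[i] = b
      · have h2 : (cs[i] == b) = true := by simp [hcb]
        simp only [h1, h2, Bool.false_or, if_true, if_false, Bool.false_eq_true]
        rw [loopA_false_of_pos cs _ _ (i+1) (0+1) (by omega)]
      · have h2 : (cs[i] == b) = false := by simp [hcb]
        simp only [h1, h2, Bool.false_or, if_false, Bool.false_eq_true]
        exact loopA_eq_scan cs a b hab (i+1)
  · rw [if_neg hi, List.drop_of_length_le (by omega)]
    rfl
termination_by cs.length - i
decreasing_by all_goals omega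

-- B-side: find of a single-char pattern
theorem single_prefix_iff (a : Char) (l : List Char) : [a] <+: l ↔ l.head? = some a := by
  cases l with
  | nil => simp
  | cons x xs => simp [List.cons_prefix_cons, eq_comm]

theorem single_infix_iff (a : Char) (l : List Char) : [a] <:+: l ↔ a ∈ l := by
  constructor
  · intro h
    have := h.sublist.subset
    simpa using this
  · intro h
    obtain ⟨s, t, rfl⟩ := List.append_of_mem h
    exact ⟨s, t, by simp⟩

theorem find_single_eq_iff (a : Char) (l : List Char) (n : Nat) :
    PySem.Chars.find l [a] = n ↔ (l[n]? = some a ∧ ∀ j, j < n → l[j]? ≠ some a) := by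
  constructor
  · intro h
    have h0 : (0:Int) ≤ PySem.Chars.find l [a] := by rw [h]; positivity
    obtain ⟨h1, h2⟩ := PySem.Chars.find_spec (s := l) (sub := [a]) h0
    rw [h] at h1 h2
    simp only [Int.toNat_natCast] at h1 h2
    rw [single_prefix_iff, List.head?_drop] at h1
    refine ⟨h1, fun j hj hja => ?_⟩
    exact h2 j hj (by rw [single_prefix_iff, List.head?_drop]; exact hja)
  · rintro ⟨h1, h2⟩
    have hinf : [a] <:+: l := by
      rw [single_infix_iff]
      exact List.mem_of_getElem? h1
    have h0 : (0:Int) ≤ PySem.Chars.find l [a] := (PySem.Chars.find_nonneg_iff _ _).mpr hinf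
    obtain ⟨g1, g2⟩ := PySem.Chars.find_spec (s := l) (sub := [a]) h0
    rw [single_prefix_iff, List.head?_drop] at g1
    set m := (PySem.Chars.find l [a]).toNat with hm
    have : m = n := by
      rcases Nat.lt_trichotomy m n with h | h | h
      · exact absurd g1 (h2 m h)
      · exact h
      · exact absurd h1 (fun hc => (g2 n h) (by rw [single_prefix_iff, List.head?_drop]; exact hc))
    omega

theorem find_single_neg_iff (a : Char) (l : List Char) :
    PySem.Chars.find l [a] = -1 ↔ a ∉ l := by
  rw [PySem.Chars.find_eq_neg_one_iff, single_infix_iff]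

theorem find_single_cons (c a : Char) (cs : List Char) :
    PySem.Chars.find (c :: cs) [a] =
      if c = a then 0
      else if PySem.Chars.find cs [a] = -1 then -1 else PySem.Chars.find cs [a] + 1 := by
  by_cases hca : c = a
  · rw [if_pos hca]
    have := (find_single_eq_iff a (c :: cs) 0).mpr (by simp [hca])
    simpa using this
  · rw [if_neg hca]
    by_cases hneg : PySem.Chars.find cs [a] = -1
    · rw [if_pos hneg, find_single_neg_iff]
      rw [find_single_neg_iff] at hneg
      simp [hneg, Ne.symm hca]
    · rw [if_neg hneg]
      have h0 : (0:Int) ≤ PySem.Chars.find cs [a] := by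
        have := PySem.Chars.neg_one_le_find (s := cs) (sub := [a])
        omega
      set q := PySem.Chars.find cs [a] with hq
      have hqn : q = ((q.toNat : Nat) : Int) := by omega
      obtain ⟨h1, h2⟩ := (find_single_eq_iff a cs q.toNat).mp (by omega)
      have := (find_single_eq_iff a (c :: cs) (q.toNat + 1)).mpr ?_
      · rw [this]; omega
      · constructor
        · simpa using h1
        · intro j hj
          match j with
          | 0 => simpa using hca
          | k+1 => simpa using h2 k (by omega)

-- B-side core on lists
def listB (a b : Char) (cs : List Char) : Bool :=
  let p1 := PySem.Chars.find cs [a]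
  if p1 == -1 then false
  else
    let p2 := PySem.Chars.find cs [b]
    if !(p2 == -1) && p2 < p1 then false
    else decide (p1 + 1 < (cs.length : Int)) && (cs[(p1 + 1).toNat]? == some b)

theorem listB_eq_scan (a b : Char) (hab : a ≠ b) (cs : List Char) :
    listB a b cs = scanAB a b cs := by
  induction cs with
  | nil => simp [listB, scanAB, find_single_neg_iff]
  | cons c cs ih =>
    have ha := PySem.Chars.neg_one_le_find cs [a]
    have hb := PySem.Chars.neg_one_le_find cs [b]
    rw [listB, scanAB]
    simp only [find_single_cons]
    by_cases hca : c = a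
    · have hcb : ¬ c = b := by rw [hca]; exact hab
      have e1 : (c == a) = true := by simp [hca]
      simp only [if_pos hca, if_neg hcb, e1, if_true]
      rw [if_neg (by simp)]
      rw [if_neg ?cond]
      case cond =>
        by_cases h2 : PySem.Chars.find cs [b] = -1
        · simp [h2]
        · simp only [if_neg h2]; simp; omega
      cases cs <;> simp
    · have e1 : (c == a) = false := by simp [hca]
      rw [if_neg hca]
      by_cases hcb : c = b
      · have e2 : (c == b) = true := by simp [hcb]
        simp only [if_pos hcb, e1, e2, Bool.false_eq_true, if_false, if_true]
        by_cases h1 : PySem.Chars.find cs [a] = -1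
        · simp only [if_pos h1]
          simp
        · simp only [if_neg h1]
          have o1 : ((PySem.Chars.find cs [a] + 1 : Int) == -1) = false := by simp; omega
          simp only [o1, Bool.false_eq_true, if_false]
          rw [if_pos (by simp; omega)]
      · have e2 : (c == b) = false := by simp [hcb]
        rw [if_neg hcb, ← ih, listB]
        simp only [e1, e2, Bool.false_eq_true, if_false]
        by_cases h1 : PySem.Chars.find cs [a] = -1
        · simp only [if_pos h1]
          simp [h1]
        · simp only [if_neg h1]
          have o1 : ((PySem.Chars.find cs [a] + 1 : Int) == -1) = false := by simp; omega
          have o2 : ((PySem.Chars.find cs [a] : Int) == -1) = false := by simpa using h1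
          simp only [o1, o2, Bool.false_eq_true, if_false]
          by_cases h2 : PySem.Chars.find cs [b] = -1
          · simp only [if_pos h2]
            rw [if_neg (by simp), if_neg (by simp [h2])]
            congr 1
            · apply decide_eq_decide.mpr
              simp only [List.length_cons]
              push_cast
              omega
            · rw [show (PySem.Chars.find cs [a] + 1 + 1).toNat
                    = (PySem.Chars.find cs [a] + 1).toNat + 1 by omega,
                  List.getElem?_cons_succ]
          · simp only [if_neg h2]
            by_cases h3 : PySem.Chars.find cs [b] < PySem.Chars.find cs [a]
            · rw [if_pos (by simp; omega), if_pos (by simp; omega)]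
            · rw [if_neg (by simp; omega), if_neg (by simp; omega)]
              congr 1
              · apply decide_eq_decide.mpr
                simp only [List.length_cons]
                push_cast
                omega
              · rw [show (PySem.Chars.find cs [a] + 1 + 1).toNat
                      = (PySem.Chars.find cs [a] + 1).toNat + 1 by omega,
                    List.getElem?_cons_succ]

theorem alt_eq_listB (word : String) (a b : Char) :
    goes_after_alt word (String.ofList [a]) (String.ofList [b]) =
      if a = b then false else listB a b word.toList := by
  have hw := PySem.Chars.neg_one_le_find word.toList [a]
  rw [goes_after_alt]
  by_cases hab : a = b
  · rw [if_pos (by simp [hab]), if_pos hab]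
  · rw [if_neg ?g, if_neg hab, listB]
    case g => simp [ofList_beq_single, hab, PySem.Str.len_eq]
    dsimp only
    simp only [PySem.Str.find_eq, String.toList_ofList]
    by_cases h1 : PySem.Chars.find word.toList [a] = -1
    · have o1 : ((PySem.Chars.find word.toList [a] : Int) == -1) = true := by simp [h1]
      simp only [o1, if_true]
    · have o1 : ((PySem.Chars.find word.toList [a] : Int) == -1) = false := by simpa using h1
      simp only [o1, Bool.false_eq_true, if_false]
      by_cases h2 : (!(PySem.Chars.find word.toList [b] == -1)
          && decide (PySem.Chars.find word.toList [b] < PySem.Chars.find word.toList [a])) = true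
      · simp only [h2, if_true]
      · have h2' : (!(PySem.Chars.find word.toList [b] == -1)
            && decide (PySem.Chars.find word.toList [b] < PySem.Chars.find word.toList [a])) = false := by
          revert h2
          cases (!(PySem.Chars.find word.toList [b] == -1)
            && decide (PySem.Chars.find word.toList [b] < PySem.Chars.find word.toList [a])) <;> simp
        simp only [h2', Bool.false_eq_true, if_false]
        rw [PySem.Str.len_eq,
            show PySem.Chars.find word.toList [a] + 1
              = (((PySem.Chars.find word.toList [a] + 1).toNat : Nat) : Int) by omega,
            PySem.Str.pyGet?_natCast]
        simp only [Int.toNat_natCast]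
        cases h : word.toList[(PySem.Chars.find word.toList [a] + 1).toNat]? with
        | none => simp
        | some d => simp [ofList_beq_single]

-- ===== VERDICT (by name: the statement is the Claim_ definition above) =====
theorem goes_after_spec : Claim_equal_goes_after := by
  intro word first second _dom
  unfold Spec_goes_after
  by_cases hLf : ∃ a, first.toList = [a]
  · obtain ⟨a, ha⟩ := hLf
    have hfirst : first = String.ofList [a] := by rw [← ha, String.ofList_toList]
    subst hfirst
    by_cases hLs : ∃ b, second.toList = [b]
    · obtain ⟨b, hb⟩ := hLs
      have hsecond : second = String.ofList [b] := by rw [← hb, String.ofList_toList]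
      subst hsecond
      by_cases hab : a = b
      · subst hab
        rw [goes_after, if_pos (by simp), alt_eq_listB, if_pos rfl]
      · rw [goes_after, if_neg (by simp [ofList_beq_single, hab]), alt_eq_listB,
            if_neg hab]
        have := loopA_eq_scan word.toList a b hab 0
        rw [List.drop_zero] at this
        rw [this]
        exact (listB_eq_scan a b hab word.toList).symm
    · push Not at hLs
      have hlen : second.toList.length ≠ 1 := by
        intro hc
        exact hLs _ (List.length_eq_one_iff.mp hc).choose_spec
      by_cases hfs : (String.ofList [a] == second) = true
      · rw [goes_after, if_pos hfs, goes_after_alt, if_pos (by simp [hfs])]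
      · rw [goes_after, if_neg hfs,
            loopA_false_no_second word.toList _ _ 0 0 (fun c hc => hLs c hc),
            goes_after_alt,
            if_pos (by simp only [Bool.or_eq_true]; refine Or.inr ?_; simp [PySem.Str.len_eq]; exact_mod_cast hlen)]
  · push Not at hLf
    have hlen : first.toList.length ≠ 1 := by
      intro hc
      exact hLf _ (List.length_eq_one_iff.mp hc).choose_spec
    by_cases hfs : (first == second) = true
    · rw [goes_after, if_pos hfs, goes_after_alt, if_pos (by simp [hfs])]
    · rw [goes_after, if_neg hfs,
          loopA_false_no_first word.toList _ _ 0 0 (fun c hc => hLf c hc),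
          goes_after_alt,
          if_pos (by simp only [Bool.or_eq_true]; refine Or.inl (Or.inr ?_); simp [PySem.Str.len_eq]; exact_mod_cast hlen)]
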